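-- pv_equiv track=rewrite | github.com/JohanSchott/impurityModel | impurityModel/ed/product_state_representation.py | tuple2str
-- ===== SOURCE A (Python) =====
-- def tuple2str(t, n):
--     """
--     Returns string representation of product state.
--
--     Parameters
--     ----------
--     t : tuple
--         Product state.
--     n : int
--         Total number of spin-orbitals in the system.
--
--     """
--     s = ""
--     for i in range(n):
--         if i in t:
--             s += "1"
--         else:
--             s += "0"
--     return s
-- ===== SOURCE B (Python) =====
-- def tuple2str(t, n):
--     chars = ["0"] * max(n, 0)
--     for i in t:
--         if 0 <= i < n:
--             chars[i] = "1"
--     return "".join(chars)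
-- ===== Notes on version B (the rewrite author's own statement) =====
-- stated objective: faster
-- what changed: Instead of scanning every position 0..n-1 with a membership test over t, B allocates a buffer of n '0' chars and scatters '1' at each in-range index of t, then joins once.
import Mathlib
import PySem

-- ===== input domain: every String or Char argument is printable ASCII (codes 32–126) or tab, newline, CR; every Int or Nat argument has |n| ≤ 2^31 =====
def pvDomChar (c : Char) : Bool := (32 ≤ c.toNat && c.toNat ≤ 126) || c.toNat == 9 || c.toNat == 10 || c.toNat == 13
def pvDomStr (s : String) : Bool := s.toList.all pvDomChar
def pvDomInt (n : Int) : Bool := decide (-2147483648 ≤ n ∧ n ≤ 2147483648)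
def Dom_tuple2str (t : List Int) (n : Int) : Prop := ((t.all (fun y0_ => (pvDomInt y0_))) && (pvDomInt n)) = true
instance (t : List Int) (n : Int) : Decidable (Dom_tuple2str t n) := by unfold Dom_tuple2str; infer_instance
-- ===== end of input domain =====

-- B replaces A's scan of all n positions with an n-membership test each by a
-- zero-filled buffer scattered with '1' at the in-range indices of t (faster: O(n+|t|) vs O(n·|t|)).

-- ===== PORT A =====
-- s = ""; for i in range(n): s += "1" if i in t else "0"; return s
def tuple2str (t : List Int) (n : Int) : String :=
  String.ofList
    ((PySem.List.pyRange 0 n 1).foldl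
      (fun s i => if t.contains i then s ++ ['1'] else s ++ ['0']) [])

-- ===== PORT B =====
-- chars = ["0"] * max(n, 0); for i in t: if 0 <= i < n: chars[i] = "1"; return "".join(chars)
def tuple2str_alt (t : List Int) (n : Int) : String :=
  String.ofList
    (t.foldl (fun cs i => if 0 ≤ i ∧ i < n then cs.set i.toNat '1' else cs)
      (List.replicate n.toNat '0'))

-- ===== PRECONDITION & SPEC =====
def Spec_tuple2str (t : List Int) (n : Int) (out : String) : Prop := out = tuple2str_alt t n
instance (t : List Int) (n : Int) (out : String) : Decidable (Spec_tuple2str t n out) := by unfold Spec_tuple2str; infer_instance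

-- ===== CLAIM (what is proved, stated in full; the proofs are below) =====
def Claim_equal_tuple2str : Prop := ∀ (t : List Int) (n : Int), Dom_tuple2str t n → Spec_tuple2str t n (tuple2str t n)

-- ===== LEMMAS AND PROOFS =====

-- A's loop appends one char per position: it is a map over the range.
theorem tuple2str_foldlA (t : List Int) (l : List Int) (acc : List Char) :
    l.foldl (fun s i => if t.contains i then s ++ ['1'] else s ++ ['0']) acc
      = acc ++ l.map (fun i => if t.contains i then '1' else '0') := by
  induction l generalizing acc with
  | nil => simp
  | cons i l ih =>
    rw [List.foldl_cons, ih]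
    by_cases h : i ∈ t <;> simp [h]

-- B's scatter loop preserves the buffer length.
theorem tuple2str_scatter_len (n : Int) (t : List Int) (buf : List Char) :
    (t.foldl (fun cs i => if 0 ≤ i ∧ i < n then cs.set i.toNat '1' else cs) buf).length
      = buf.length := by
  induction t generalizing buf with
  | nil => rfl
  | cons i t ih =>
    simp only [List.foldl_cons]
    by_cases h : 0 ≤ i ∧ i < n <;> simp [h, ih]

-- Element j of B's scatter result: '1' if j occurs in t, else the old buffer entry.
theorem tuple2str_scatter_get (n : Int) (t : List Int) (buf : List Char)
    (hb : buf.length = n.toNat) (j : Nat) (hj : j < buf.length) :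
    (t.foldl (fun cs i => if 0 ≤ i ∧ i < n then cs.set i.toNat '1' else cs) buf)[j]'
        (by rw [tuple2str_scatter_len]; exact hj)
      = if t.contains ((j : Nat) : Int) then '1' else buf[j] := by
  induction t generalizing buf with
  | nil => simp
  | cons i t ih =>
    simp only [List.foldl_cons]
    by_cases h : 0 ≤ i ∧ i < n
    · simp only [if_pos h]
      have hb' : (buf.set i.toNat '1').length = n.toNat := by simpa using hb
      have hj' : j < (buf.set i.toNat '1').length := by simpa using hj
      rw [ih _ hb' hj']
      by_cases hm : ((j : Nat) : Int) ∈ t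
      · simp [hm]
      · by_cases hij : i = ((j : Nat) : Int)
        · have heq : i.toNat = j := by omega
          simp [hm, hij]
        · have hne : i.toNat ≠ j := by omega
          have hji : ((j : Nat) : Int) ≠ i := fun hc => hij hc.symm
          simp [hm, hji, hne]
    · simp only [if_neg h]
      rw [ih buf hb hj]
      have hji : ((j : Nat) : Int) ≠ i := by
        intro hc; apply h; constructor <;> omega
      simp [hji]

theorem tuple2str_spec : Claim_equal_tuple2str := by
  unfold Claim_equal_tuple2str
  intro t n _
  unfold Spec_tuple2str tuple2str tuple2str_alt
  congr 1
  rw [tuple2str_foldlA, PySem.List.pyRange_one]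
  apply List.ext_getElem
  · simp [tuple2str_scatter_len]
  · intro j h1 h2
    have hb : (List.replicate n.toNat '0').length = n.toNat := by simp
    have hj : j < (List.replicate n.toNat '0').length := by
      simpa [tuple2str_scatter_len] using h2
    rw [tuple2str_scatter_get n t _ hb j hj]
    have hjn : j < (n - 0).toNat := by simpa [tuple2str_scatter_len] using h2
    simp [List.getElem_map, List.getElem_range, List.getElem_replicate]
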